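-- pv_equiv track=rewrite | github.com/jimy-byerley/uimadcad | src/editor.py | textsize
-- ===== SOURCE A (Python) =====
-- def textsize(text, tab=4):
-- 	l = c = 0
-- 	for char in text:
-- 		if char == '\n':
-- 			l += 1
-- 			c = 0
-- 		elif char == '\t':
-- 			c += tab
-- 			c -= c%tab
-- 		else:
-- 			c += 1
-- 	return l,c
-- ===== SOURCE B (Python) =====
-- def textsize(text, tab=4):
-- 	# line count: number of newlines; column: re-run the tab-stop logic
-- 	# over just the final line (the characters after the last newline).
-- 	l = sum(ch == '\n' for ch in text)
-- 	last_rev = []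
-- 	for ch in reversed(text):
-- 		if ch == '\n':
-- 			break
-- 		last_rev.append(ch)
-- 	c = 0
-- 	for ch in reversed(last_rev):
-- 		if ch == '\t':
-- 			c += tab
-- 			c -= c % tab
-- 		else:
-- 			c += 1
-- 	return l, c
-- ===== Notes on version B (the rewrite author's own statement) =====
-- stated objective: alternative
-- what changed: Replaces A's single stateful three-branch pass with a decomposition: a boolean-sum counts newlines, a backward scan extracts the final line, and the tab-stop column loop runs only over that final line.
import Mathlib
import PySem

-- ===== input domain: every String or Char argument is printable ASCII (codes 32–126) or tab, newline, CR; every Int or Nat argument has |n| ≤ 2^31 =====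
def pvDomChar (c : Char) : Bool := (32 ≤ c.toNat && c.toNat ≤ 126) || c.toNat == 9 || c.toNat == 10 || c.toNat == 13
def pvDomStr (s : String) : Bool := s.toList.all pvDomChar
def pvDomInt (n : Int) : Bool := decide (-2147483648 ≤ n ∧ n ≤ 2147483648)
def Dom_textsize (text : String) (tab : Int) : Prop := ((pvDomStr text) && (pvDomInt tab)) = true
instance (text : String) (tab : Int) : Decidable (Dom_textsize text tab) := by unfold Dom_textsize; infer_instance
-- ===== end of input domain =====

-- B splits A's single three-branch pass into a newline count plus a column loop over only the final line (alternative decomposition; same cost).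


-- ===== PORT A =====
-- loop body of A: newline resets the column, a tab character advances the column
-- to the next tab stop (add tab, then subtract the Python modulo), anything else adds 1
def pvStepA (tab : Int) (s : Int × Int) (ch : Char) : Int × Int :=
  if ch = '\n' then (s.1 + 1, 0)
  else if ch = '\t' then (s.1, s.2 + tab - PySem.Int.mod (s.2 + tab) tab)
  else (s.1, s.2 + 1)

def textsize (text : String) (tab : Int) : Int × Int :=
  text.toList.foldl (pvStepA tab) (0, 0)

-- ===== PORT B =====
-- loop body of B's column pass (same tab-stop arithmetic, no newline case)
def pvStepC (tab : Int) (c : Int) (ch : Char) : Int :=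
  if ch = '\t' then c + tab - PySem.Int.mod (c + tab) tab
  else c + 1

def textsize_alt (text : String) (tab : Int) : Int × Int :=
  -- l = sum(ch == '\n' for ch in text)
  let l : Int := text.toList.foldl (fun acc ch => if ch == '\n' then acc + 1 else acc) 0
  -- backward scan with break collecting the final line reversed (= takeWhile on the reversed list)
  let lastRev := text.toList.reverse.takeWhile (fun ch => ch != '\n')
  (l, lastRev.reverse.foldl (pvStepC tab) 0)

-- ===== PRECONDITION & SPEC =====
-- Pre_ excludes only inputs where the Python A raises: tab equal to zero combined with
-- a tab character in the text makes A's modulo step a ZeroDivisionError.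
def Pre_textsize (text : String) (tab : Int) : Prop := '\t' ∈ text.toList → tab ≠ 0
instance (text : String) (tab : Int) : Decidable (Pre_textsize text tab) := by unfold Pre_textsize; infer_instance
def pvWitness_textsize : String × Int := ("ab\n\tc", 4)
def Spec_textsize (text : String) (tab : Int) (out : Int × Int) : Prop := out = textsize_alt text tab
instance (text : String) (tab : Int) (out : Int × Int) : Decidable (Spec_textsize text tab out) := by unfold Spec_textsize; infer_instance

-- ===== CLAIM (what is proved, stated in full; the proofs are below) =====
def Claim_equal_textsize : Prop := ∀ (text : String) (tab : Int), Dom_textsize text tab → Pre_textsize text tab → Spec_textsize text tab (textsize text tab)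

-- ===== LEMMAS AND PROOFS =====
-- final line of xs (characters after the last newline), as B computes it
def pvLastline (xs : List Char) : List Char :=
  (xs.reverse.takeWhile (fun ch => ch != '\n')).reverse

lemma pvLastline_of_not_mem (xs : List Char) (h : '\n' ∉ xs) : pvLastline xs = xs := by
  unfold pvLastline
  rw [List.takeWhile_eq_self_iff.mpr, List.reverse_reverse]
  intro a ha
  simp only [ne_eq, bne_iff_ne]
  intro rfl_eq
  exact h (by simpa [rfl_eq] using List.mem_reverse.mp ha)

lemma pvTakeWhile_len_ne (xs : List Char) (h : '\n' ∈ xs) :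
    (xs.reverse.takeWhile (fun ch => ch != '\n')).length ≠ xs.reverse.length := by
  intro hlen
  have heq : xs.reverse.takeWhile (fun ch => ch != '\n') = xs.reverse :=
    (List.takeWhile_prefix _).eq_of_length hlen
  have := List.takeWhile_eq_self_iff.mp heq '\n' (List.mem_reverse.mpr h)
  simp at this

lemma pvLastline_cons_mem (x : Char) (xs : List Char) (h : '\n' ∈ xs) :
    pvLastline (x :: xs) = pvLastline xs := by
  unfold pvLastline
  rw [List.reverse_cons, List.takeWhile_append, if_neg (pvTakeWhile_len_ne xs h)]

lemma pvLastline_cons_not_mem (x : Char) (xs : List Char) (h : '\n' ∉ xs) (hx : x ≠ '\n') :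
    pvLastline (x :: xs) = x :: xs := by
  have hall : xs.reverse.takeWhile (fun ch => ch != '\n') = xs.reverse :=
    List.takeWhile_eq_self_iff.mpr (fun a ha => by
      simp only [bne_iff_ne, ne_eq]
      intro hh; exact h (by simpa [hh] using List.mem_reverse.mp ha))
  unfold pvLastline
  rw [List.reverse_cons, List.takeWhile_append, if_pos (by rw [hall])]
  simp [hx]

lemma pvLastline_newline_cons (xs : List Char) :
    pvLastline ('\n' :: xs) = pvLastline xs := by
  by_cases h : '\n' ∈ xs
  · exact pvLastline_cons_mem _ _ h
  · have hall : xs.reverse.takeWhile (fun ch => ch != '\n') = xs.reverse :=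
      List.takeWhile_eq_self_iff.mpr (fun a ha => by
        simp only [bne_iff_ne, ne_eq]
        intro hh; exact h (by simpa [hh] using List.mem_reverse.mp ha))
    unfold pvLastline
    rw [List.reverse_cons, List.takeWhile_append, if_pos (by rw [hall]), hall]
    simp

lemma pvLoopA_eq (tab : Int) (xs : List Char) : ∀ (l c : Int),
    xs.foldl (pvStepA tab) (l, c) =
      (l + (xs.count '\n' : Int),
       (pvLastline xs).foldl (pvStepC tab) (if '\n' ∈ xs then 0 else c)) := by
  induction xs with
  | nil => intro l c; simp [pvLastline]
  | cons x xs ih =>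
    intro l c
    by_cases hx : x = '\n'
    · subst hx
      rw [List.foldl_cons, pvLastline_newline_cons]
      show List.foldl (pvStepA tab) (pvStepA tab (l, c) '\n') xs = _
      rw [show pvStepA tab (l, c) '\n' = (l + 1, 0) from by simp [pvStepA], ih]
      have : ((('\n' :: xs).count '\n' : Nat) : Int) = (xs.count '\n' : Int) + 1 := by
        rw [List.count_cons_self]; push_cast; ring
      rw [this]
      simp only [List.mem_cons, true_or, if_pos]
      refine Prod.ext ?_ ?_
      · show l + 1 + _ = l + (_ + 1); ring
      · show List.foldl _ (if '\n' ∈ xs then 0 else 0) _ = _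
        split_ifs <;> rfl
    · rw [List.foldl_cons]
      have hstep : pvStepA tab (l, c) x = (l, pvStepC tab c x) := by
        simp only [pvStepA, pvStepC, if_neg hx]
        split_ifs <;> rfl
      rw [hstep, ih]
      have hcount : ((x :: xs).count '\n') = xs.count '\n' := by
        simp [hx]

      rw [hcount]
      by_cases hmem : '\n' ∈ xs
      · rw [pvLastline_cons_mem x xs hmem]
        simp [hmem, List.mem_cons]
      · rw [pvLastline_cons_not_mem x xs hmem hx, pvLastline_of_not_mem xs hmem]
        have : '\n' ∉ x :: xs := by
          intro hh; rcases List.mem_cons.mp hh with h1 | h2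
          · exact hx h1.symm
          · exact hmem h2
        rw [if_neg hmem, if_neg this, List.foldl_cons]

-- ===== VERDICT (by name: the statement is the Claim_ definition above) =====
theorem textsize_spec : Claim_equal_textsize := by
  intro text tab _ _
  unfold Spec_textsize textsize textsize_alt
  rw [pvLoopA_eq, PySem.List.foldl_beq_add_one]
  simp [pvLastline]
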